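-- pv_equiv track=rewrite | github.com/dominodatalab/docker-registry-cleaner | python/utils/image_data_analysis.py | filter_tags_by_object_ids
-- ===== SOURCE A (Python) =====
-- from typing import Dict, List, Optional
--
-- def filter_tags_by_object_ids(tags: List[str], object_ids: Optional[List[str]] = None) -> List[str]:
--     """Filter tags to only include those that start with one of the provided ObjectIDs"""
--     if not object_ids:
--         return tags
--
--     filtered_tags = []
--     for tag in tags:
--         # Check if the tag starts with any of the provided ObjectIDs
--         for obj_id in object_ids:
--             if tag.startswith(obj_id):
--                 filtered_tags.append(tag)
--                 break
--
--     return filtered_tags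
-- ===== SOURCE B (Python) =====
-- def filter_tags_by_object_ids(tags, object_ids=None):
--     """Filter tags to only include those that start with one of the provided ObjectIDs"""
--     if not object_ids:
--         return tags
--     ids = set(object_ids)
--     lens = sorted({len(o) for o in object_ids})
--     return [tag for tag in tags
--             if any(k <= len(tag) and tag[:k] in ids for k in lens)]
-- ===== Notes on version B (the rewrite author's own statement) =====
-- stated objective: faster
-- what changed: Replaces the per-tag scan over all object_ids with a precomputed hash set of ids plus the distinct prefix lengths, so each tag is checked by slicing it at each candidate length and doing one set lookup.
import Mathlib
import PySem

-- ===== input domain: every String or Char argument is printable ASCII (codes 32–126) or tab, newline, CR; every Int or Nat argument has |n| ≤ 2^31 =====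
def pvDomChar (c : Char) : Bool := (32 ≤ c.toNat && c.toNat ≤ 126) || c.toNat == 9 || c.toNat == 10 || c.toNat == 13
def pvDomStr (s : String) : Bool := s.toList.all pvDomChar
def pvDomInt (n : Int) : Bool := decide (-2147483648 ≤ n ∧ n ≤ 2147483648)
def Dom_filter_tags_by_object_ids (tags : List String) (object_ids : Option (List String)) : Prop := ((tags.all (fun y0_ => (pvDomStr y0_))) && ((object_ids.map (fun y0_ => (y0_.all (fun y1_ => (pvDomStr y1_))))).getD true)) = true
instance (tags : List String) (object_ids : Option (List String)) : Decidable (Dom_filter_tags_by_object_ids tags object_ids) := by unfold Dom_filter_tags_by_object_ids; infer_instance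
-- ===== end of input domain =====

-- B replaces A's per-tag scan over all object_ids with a set of ids plus the distinct id lengths,
-- slicing each tag at each candidate length and looking the slice up in the set (faster in a timing run).
-- ===== PORT A =====
-- inner 'for obj_id in object_ids: if tag.startswith(obj_id): append; break'
def tagMatchesA (tag : String) : List String → Bool
  | [] => false
  | o :: rest => if PySem.Str.startswith tag o then true else tagMatchesA tag rest

def filter_tags_by_object_ids (tags : List String) (object_ids : Option (List String)) : List String :=
  match object_ids with
  | none => tags
  | some obj =>
    if obj = [] then tags
    else tags.foldl (fun acc tag => if tagMatchesA tag obj then acc ++ [tag] else acc) []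

-- ===== PORT B =====
def filter_tags_by_object_ids_alt (tags : List String) (object_ids : Option (List String)) : List String :=
  match object_ids with
  | none => tags
  | some obj =>
    if obj = [] then tags
    else
      let ids : PySem.Set String := PySem.Set.ofList obj
      let lens : List Int := PySem.List.sorted (PySem.Set.ofList (obj.map PySem.Str.len)) (fun x => x) false
      tags.filter (fun tag => lens.any (fun k =>
        decide (k ≤ PySem.Str.len tag) && ids.contains (PySem.Str.slice tag none (some k))))

-- ===== PRECONDITION & SPEC =====
def Spec_filter_tags_by_object_ids (tags : List String) (object_ids : Option (List String)) (out : List String) : Prop := out = filter_tags_by_object_ids_alt tags object_ids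
instance (tags : List String) (object_ids : Option (List String)) (out : List String) : Decidable (Spec_filter_tags_by_object_ids tags object_ids out) := by unfold Spec_filter_tags_by_object_ids; infer_instance

-- ===== CLAIM (what is proved, stated in full; the proofs are below) =====
def Claim_equal_filter_tags_by_object_ids : Prop := ∀ (tags : List String) (object_ids : Option (List String)), Dom_filter_tags_by_object_ids tags object_ids → Spec_filter_tags_by_object_ids tags object_ids (filter_tags_by_object_ids tags object_ids)

-- ===== LEMMAS AND PROOFS =====
lemma tagMatchesA_iff (tag : String) (obj : List String) :
    tagMatchesA tag obj = true ↔ ∃ o ∈ obj, o.toList <+: tag.toList := by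
  induction obj with
  | nil => simp [tagMatchesA]
  | cons o rest ih =>
    simp only [tagMatchesA, List.mem_cons]
    by_cases h : PySem.Str.startswith tag o = true
    · simp only [if_pos h]
      rw [PySem.Str.startswith_eq, PySem.Chars.startswith_iff] at h
      exact ⟨fun _ => ⟨o, Or.inl rfl, h⟩, fun _ => trivial⟩
    · rw [if_neg h, ih]
      rw [PySem.Str.startswith_eq] at h
      constructor
      · rintro ⟨x, hx, hp⟩; exact ⟨x, Or.inr hx, hp⟩
      · rintro ⟨x, hx, hp⟩
        rcases hx with rfl | hx
        · exact absurd ((PySem.Chars.startswith_iff _ _).mpr hp) h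
        · exact ⟨x, hx, hp⟩

lemma any_eq_tagMatchesA (tag : String) (obj : List String) :
    (PySem.List.sorted (PySem.Set.ofList (obj.map PySem.Str.len)) (fun x => x) false).any
      (fun k => decide (k ≤ PySem.Str.len tag) &&
        (PySem.Set.ofList obj).contains (PySem.Str.slice tag none (some k))) = true ↔
    tagMatchesA tag obj = true := by
  rw [tagMatchesA_iff, List.any_eq_true]
  constructor
  · rintro ⟨k, hk, hb⟩
    rw [Bool.and_eq_true, decide_eq_true_eq] at hb
    obtain ⟨hle, hc⟩ := hb
    rw [PySem.List.mem_sorted, PySem.Set.mem_ofList, List.mem_map] at hk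
    obtain ⟨o, _, rfl⟩ := hk
    have hk0 : (0:Int) ≤ PySem.Str.len o := by rw [PySem.Str.len_eq]; positivity
    have hmem : PySem.Str.slice tag none (some (PySem.Str.len o)) ∈ obj := by
      rwa [PySem.Set.contains_iff, PySem.Set.mem_ofList] at hc
    refine ⟨_, hmem, ?_⟩
    have : (PySem.Str.slice tag none (some (PySem.Str.len o))).toList
        = tag.toList.take (PySem.Str.len o).toNat := by
      simp only [PySem.Str.slice, PySem.Chars.slice_eq_listSlice, String.toList_ofList]
      rw [PySem.List.slice_to _ hk0]
    rw [this]
    exact List.take_prefix _ _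
  · rintro ⟨o, ho, hp⟩
    refine ⟨PySem.Str.len o, ?_, ?_⟩
    · rw [PySem.List.mem_sorted, PySem.Set.mem_ofList, List.mem_map]
      exact ⟨o, ho, rfl⟩
    · rw [Bool.and_eq_true, decide_eq_true_eq]
      have hlen : o.toList.length ≤ tag.toList.length := hp.length_le
      constructor
      · rw [PySem.Str.len_eq, PySem.Str.len_eq]; exact_mod_cast hlen
      · have hk0 : (0:Int) ≤ PySem.Str.len o := by rw [PySem.Str.len_eq]; positivity
        have hsl : (PySem.Str.slice tag none (some (PySem.Str.len o))).toList = o.toList := by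
          simp only [PySem.Str.slice, PySem.Chars.slice_eq_listSlice, String.toList_ofList]
          rw [PySem.List.slice_to _ hk0, PySem.Str.len_eq]
          simp only [Int.toNat_natCast]
          exact (List.prefix_iff_eq_take.mp hp).symm
        rw [PySem.Set.contains_iff, PySem.Set.mem_ofList]
        have : PySem.Str.slice tag none (some (PySem.Str.len o)) = o := String.ext hsl
        rwa [this]


-- ===== VERDICT (by name: the statement is the Claim_ definition above) =====
theorem filter_tags_by_object_ids_spec : Claim_equal_filter_tags_by_object_ids := by
  intro tags object_ids _
  unfold Spec_filter_tags_by_object_ids filter_tags_by_object_ids filter_tags_by_object_ids_alt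
  cases object_ids with
  | none => rfl
  | some obj =>
    by_cases h : obj = []
    · simp [h]
    · simp only [if_neg h]
      rw [PySem.List.foldl_append_ite_eq_filter (fun t => tagMatchesA t obj = true)]
      simp only [List.nil_append]
      apply List.filter_congr
      intro tag _
      rw [Bool.eq_iff_iff, decide_eq_true_eq, any_eq_tagMatchesA]
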